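-- pv_equiv track=rewrite | github.com/kkr010128/codebert | problem024/problem024_40.py | trucks
-- ===== SOURCE A (Python) =====
-- def trucks(p, k):
--     t = 0
--     c = 1
--     for i in range(len(p)):
--         if p[i] > k:
--             return 1000000
--         elif t + p[i] <= k:
--             t += p[i]
--         else:
--             t = p[i]
--             c += 1
--     return c
-- ===== SOURCE B (Python) =====
-- def fill(p, i, k):
--     # load one truck greedily starting at index i; return index of first item left behind
--     load = 0
--     while i < len(p) and load + p[i] <= k:
--         load += p[i]
--         i += 1
--     return i
--
-- def trucks(p, k):
--     if any(w > k for w in p):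
--         return 1000000
--     count = 1
--     i = fill(p, 0, k)
--     while i < len(p):
--         count += 1
--         i = fill(p, i, k)
--     return count
-- ===== Notes on version B (the rewrite author's own statement) =====
-- stated objective: alternative
-- what changed: Replaces A's single fused loop with inline early-return by a staged decomposition: a validation pass for overweight items, then an outer loop over trucks that repeatedly calls a fill(p, i, k) helper advancing an index past one greedily loaded truck.
import Mathlib
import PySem

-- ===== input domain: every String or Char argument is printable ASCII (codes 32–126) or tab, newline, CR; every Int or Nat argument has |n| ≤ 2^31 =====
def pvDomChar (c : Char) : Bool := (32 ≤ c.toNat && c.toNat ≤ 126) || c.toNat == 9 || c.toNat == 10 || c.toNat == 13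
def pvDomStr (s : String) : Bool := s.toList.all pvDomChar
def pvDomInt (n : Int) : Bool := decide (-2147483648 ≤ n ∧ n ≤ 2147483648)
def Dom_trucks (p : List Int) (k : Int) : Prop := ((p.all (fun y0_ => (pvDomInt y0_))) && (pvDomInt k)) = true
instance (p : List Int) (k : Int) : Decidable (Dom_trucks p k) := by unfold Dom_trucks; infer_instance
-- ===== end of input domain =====

-- B restructures A's fused single loop into a validation pass plus nested loops:
-- an outer loop over trucks calling a helper that fills one truck from an index; alternative decomposition, same cost.

-- ===== PORT A =====
-- A's for-loop over indices, with early return on overweight, as structural recursion over the list carrying (t, c)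
def trucksGo (k : Int) : List Int → Int → Int → Int
  | [], _, c => c
  | w :: ws, t, c =>
    if w > k then 1000000
    else if t + w ≤ k then trucksGo k ws (t + w) c
    else trucksGo k ws w (c + 1)

def trucks (p : List Int) (k : Int) : Int := trucksGo k p 0 1

-- ===== PORT B =====
-- Source B's inner `while i < len(p) and load + p[i] <= k` loop of fill, with fuel making the while total
def fillGo (p : List Int) (k : Int) : Nat → Nat → Int → Nat
  | 0, i, _ => i
  | f + 1, i, load =>
    if h : i < p.length then
      if load + p[i] ≤ k then fillGo p k f (i + 1) (load + p[i]) else i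
    else i

-- Source B's fill helper: index of the first item left behind after filling one truck from index i
def fill (p : List Int) (i : Nat) (k : Int) : Nat := fillGo p k (p.length - i) i 0

-- Source B's outer `while i < len(p)` loop over trucks, with fuel making the while total
def trucksAltGo (p : List Int) (k : Int) : Nat → Nat → Int → Int
  | 0, _, c => c
  | f + 1, i, c => if i < p.length then trucksAltGo p k f (fill p i k) (c + 1) else c

def trucks_alt (p : List Int) (k : Int) : Int :=
  if p.any (fun w => w > k) then 1000000
  else trucksAltGo p k p.length (fill p 0 k) 1

-- ===== PRECONDITION & SPEC =====
def Spec_trucks (p : List Int) (k : Int) (out : Int) : Prop := out = trucks_alt p k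
instance (p : List Int) (k : Int) (out : Int) : Decidable (Spec_trucks p k out) := by unfold Spec_trucks; infer_instance

-- ===== CLAIM (what is proved, stated in full; the proofs are below) =====
def Claim_equal_trucks : Prop := ∀ (p : List Int) (k : Int), Dom_trucks p k → Spec_trucks p k (trucks p k)

-- ===== LEMMAS AND PROOFS =====

-- proof-side suffix-list mirror of fill: the suffix left after filling one truck with running load
def splitT (k : Int) : Int → List Int → List Int
  | _, [] => []
  | load, w :: ws => if load + w ≤ k then splitT k (load + w) ws else w :: ws

-- proof-side suffix-list mirror of the outer truck loop
def altGoL (k : Int) : Nat → List Int → Int → Int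
  | _, [], c => c
  | 0, _ :: _, c => c
  | f + 1, w :: ws, c => altGoL k f (splitT k 0 (w :: ws)) (c + 1)

-- fillGo computed on indices equals splitT on the corresponding suffix
theorem fillGo_eq_splitT (p : List Int) (k : Int) :
    ∀ (f i : Nat) (load : Int), i ≤ p.length → p.length - i ≤ f →
      fillGo p k f i load ≤ p.length ∧
      p.drop (fillGo p k f i load) = splitT k load (p.drop i) := by
  intro f
  induction f with
  | zero =>
    intro i load hle hf
    have : i = p.length := by omega
    subst this
    simp [fillGo, splitT]
  | succ f ih =>
    intro i load hle hf
    by_cases h : i < p.length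
    · have hdrop : p.drop i = p[i] :: p.drop (i + 1) := List.drop_eq_getElem_cons h
      rw [fillGo, dif_pos h, hdrop, splitT]
      by_cases hl : load + p[i] ≤ k
      · rw [if_pos hl, if_pos hl]
        exact ih (i + 1) (load + p[i]) (by omega) (by omega)
      · rw [if_neg hl, if_neg hl, ← hdrop]
        exact ⟨le_of_lt h, rfl⟩
    · have : i = p.length := by omega
      subst this
      simp [fillGo, splitT]

-- the index-based outer loop equals the suffix-list outer loop
theorem trucksAltGo_eq_altGoL (p : List Int) (k : Int) :
    ∀ (f i : Nat) (c : Int), i ≤ p.length →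
      trucksAltGo p k f i c = altGoL k f (p.drop i) c := by
  intro f
  induction f with
  | zero =>
    intro i c hle
    cases h : p.drop i <;> simp [trucksAltGo, altGoL]
  | succ f ih =>
    intro i c hle
    by_cases h : i < p.length
    · have hdrop : p.drop i = p[i] :: p.drop (i + 1) := List.drop_eq_getElem_cons h
      obtain ⟨hle', heq⟩ := fillGo_eq_splitT p k (p.length - i) i 0 (by omega) (by omega)
      rw [trucksAltGo]
      simp only [h, if_true]
      rw [ih (fill p i k) (c + 1) hle', hdrop, altGoL, ← hdrop, ← heq]
      rfl
    · have : i = p.length := by omega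
      subst this
      simp [trucksAltGo, altGoL]

-- if some item is overweight, A's fused loop returns the sentinel from any state
theorem trucksGo_overweight (k : Int) :
    ∀ (p : List Int), (∃ w ∈ p, w > k) → ∀ (t c : Int), trucksGo k p t c = 1000000 := by
  intro p
  induction p with
  | nil => rintro ⟨w, hw, _⟩; simp at hw
  | cons w ws ih =>
    rintro ⟨v, hv, hvk⟩ t c
    by_cases hw : w > k
    · simp [trucksGo, hw]
    · have hv' : v ∈ ws := by
        rcases List.mem_cons.mp hv with h | h
        · exact absurd (h ▸ hvk) hw
        · exact h
      by_cases hl : t + w ≤ k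
      · simp [trucksGo, hw, hl, ih ⟨v, hv', hvk⟩]
      · simp [trucksGo, hw, hl, ih ⟨v, hv', hvk⟩]

-- with no overweight item, A's fused loop equals: fill the current truck, then loop over the remaining trucks
theorem trucksGo_eq_altGoL (k : Int) :
    ∀ (p : List Int), (∀ w ∈ p, ¬ w > k) → ∀ (t c : Int) (f : Nat), p.length ≤ f →
      trucksGo k p t c = altGoL k f (splitT k t p) c := by
  intro p
  induction p with
  | nil => intro _ t c f _; simp [trucksGo, splitT, altGoL]
  | cons w ws ih =>
    intro hnow t c f hf
    have hw : ¬ w > k := hnow w (List.mem_cons_self)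
    have hnows : ∀ v ∈ ws, ¬ v > k := fun v hv => hnow v (List.mem_cons_of_mem _ hv)
    by_cases hl : t + w ≤ k
    · rw [trucksGo]
      simp only [hw, if_false, hl]
      rw [ih hnows (t + w) c f (by simp at hf ⊢; omega)]
      simp [splitT, hl]
    · obtain ⟨f', rfl⟩ : ∃ f', f = f' + 1 := by
        cases f with
        | zero => simp at hf
        | succ f' => exact ⟨f', rfl⟩
      rw [trucksGo]
      simp only [hw, if_false, hl]
      have hw2 : w ≤ k := by omega
      rw [ih hnows w (c + 1) f' (by simp at hf ⊢; omega)]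
      simp [splitT, hl, altGoL, hw2]

-- ===== VERDICT (by name: the statement is the Claim_ definition above) =====
theorem trucks_spec : Claim_equal_trucks := by
  intro p k _
  unfold Spec_trucks trucks trucks_alt
  by_cases h : p.any (fun w => w > k)
  · rcases List.any_eq_true.mp h with ⟨w, hw, hwk⟩
    rw [if_pos h]
    exact trucksGo_overweight k p ⟨w, hw, by simpa using hwk⟩ 0 1
  · have hnow : ∀ w ∈ p, ¬ w > k := by
      intro w hw hgt
      exact h (List.any_eq_true.mpr ⟨w, hw, by simpa using hgt⟩)
    rw [if_neg h]
    obtain ⟨hle, heq⟩ := fillGo_eq_splitT p k (p.length - 0) 0 0 (by omega) (by omega)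
    have hle' : fill p 0 k ≤ p.length := hle
    have heq' : p.drop (fill p 0 k) = splitT k 0 p := by simpa [fill] using heq
    rw [trucksAltGo_eq_altGoL p k p.length (fill p 0 k) 1 hle', heq']
    exact trucksGo_eq_altGoL k p hnow 0 1 p.length le_rfl
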